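-- pv_equiv track=rewrite | github.com/OEvortex/project-mango | mol/config/validation.py | _is_valid_model_name
-- ===== SOURCE A (Python) =====
-- def _is_valid_model_name(model_name: str) -> bool:
--     """Basic validation of model name format."""
--     # Very basic checks for HuggingFace model naming
--     if '/' in model_name:
--         parts = model_name.split('/')
--         if len(parts) != 2:
--             return False
--         org, name = parts
--         if not org or not name:
--             return False
--
--     # Check for invalid characters
--     invalid_chars = ['<', '>', ':', '"', '|', '?', '*']
--     if any(char in model_name for char in invalid_chars):
--         return False
--
--     return True
-- ===== SOURCE B (Python) =====
-- def _is_valid_model_name(model_name: str) -> bool: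
--     """Single left-to-right scan carrying slash count and current-segment emptiness."""
--     slashes = 0
--     seg_empty = True
--     for ch in model_name:
--         if ch == '/':
--             if seg_empty or slashes == 1:
--                 return False
--             slashes = slashes + 1
--             seg_empty = True
--         elif ch in '<>:"|?*':
--             return False
--         else:
--             seg_empty = False
--     if slashes == 1 and seg_empty:
--         return False
--     return True
-- ===== Notes on version B (the rewrite author's own statement) =====
-- stated objective: alternative
-- what changed: Replaced A's split-on-slash-then-any() multi-scan validation with a single left-to-right character scan that tracks the slash count and whether the current segment is empty, rejecting as soon as a rule is violated.
import Mathlib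
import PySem

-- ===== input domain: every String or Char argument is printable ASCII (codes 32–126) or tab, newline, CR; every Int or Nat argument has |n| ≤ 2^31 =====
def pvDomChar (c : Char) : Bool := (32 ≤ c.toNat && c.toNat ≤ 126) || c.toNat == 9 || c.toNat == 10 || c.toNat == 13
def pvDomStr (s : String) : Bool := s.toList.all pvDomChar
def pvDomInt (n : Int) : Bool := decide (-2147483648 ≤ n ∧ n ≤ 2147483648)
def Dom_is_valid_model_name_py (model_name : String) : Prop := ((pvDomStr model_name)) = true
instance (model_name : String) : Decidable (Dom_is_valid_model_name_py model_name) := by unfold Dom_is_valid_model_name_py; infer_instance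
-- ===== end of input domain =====

-- B replaces A's split-plus-any() multi-scan with one left-to-right scan carrying slash/segment state (alternative decomposition, same cost).

-- ===== PORT A =====
-- invalid_chars = ['<', '>', ':', '"', '|', '?', '*']; if any(char in model_name for char in invalid_chars): return False; return True
def pvInvalidTail (cs : List Char) : Bool :=
  if (['<', '>', ':', '"', '|', '?', '*'].any (fun c => PySem.Chars.isIn [c] cs)) then false
  else true

def is_valid_model_name_py (model_name : String) : Bool :=
  let cs := model_name.toList
  if PySem.Chars.isIn ['/'] cs then
    let parts := PySem.Chars.splitOn cs ['/']
    if parts.length ≠ 2 then false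
    else
      match parts with
      | [org, name] => if org = [] ∨ name = [] then false else pvInvalidTail cs
      | _ => false
  else pvInvalidTail cs

-- ===== PORT B =====
-- the loop: state (slashes, seg_empty); early False on a second slash, an empty segment before a slash, or an invalid character
def pvGoAlt : List Char → Nat → Bool → Bool
  | [], slashes, seg_empty => !(slashes == 1 && seg_empty)
  | c :: rest, slashes, seg_empty =>
    if c == '/' then
      if seg_empty || slashes == 1 then false
      else pvGoAlt rest (slashes + 1) true
    else if ['<', '>', ':', '"', '|', '?', '*'].contains c then false
    else pvGoAlt rest slashes false

def is_valid_model_name_py_alt (model_name : String) : Bool :=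
  pvGoAlt model_name.toList 0 true

-- ===== PRECONDITION & SPEC =====
def Spec_is_valid_model_name_py (model_name : String) (out : Bool) : Prop := out = is_valid_model_name_py_alt model_name
instance (model_name : String) (out : Bool) : Decidable (Spec_is_valid_model_name_py model_name out) := by unfold Spec_is_valid_model_name_py; infer_instance

-- ===== CLAIM (what is proved, stated in full; the proofs are below) =====
def Claim_equal_is_valid_model_name_py : Prop := ∀ (model_name : String), Dom_is_valid_model_name_py model_name → Spec_is_valid_model_name_py model_name (is_valid_model_name_py model_name)

-- ===== LEMMAS AND PROOFS =====

-- simple structural split on '/', used as the common reference point of both proofs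
def pvSplitSlash : List Char → List (List Char)
  | [] => [[]]
  | c :: rest =>
    if c = '/' then [] :: pvSplitSlash rest
    else
      match pvSplitSlash rest with
      | p :: ps => (c :: p) :: ps
      | [] => [[c]]

lemma pvSplitSlash_ne_nil (cs : List Char) : pvSplitSlash cs ≠ [] := by
  induction cs with
  | nil => simp [pvSplitSlash]
  | cons c rest ih =>
    simp only [pvSplitSlash]
    split <;> try simp
    split <;> simp

lemma pvSplitSlash_no_slash (cs : List Char) (h : '/' ∉ cs) : pvSplitSlash cs = [cs] := by
  induction cs with
  | nil => rfl
  | cons c rest ih =>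
    simp only [List.mem_cons, not_or] at h
    simp only [pvSplitSlash, if_neg (Ne.symm h.1), ih h.2]

lemma pvSplitSlash_mem_slash (cs : List Char) (h : '/' ∈ cs) : 2 ≤ (pvSplitSlash cs).length := by
  induction cs with
  | nil => simp at h
  | cons c rest ih =>
    by_cases hc : c = '/'
    · simp only [pvSplitSlash, if_pos hc, List.length_cons]
      have := pvSplitSlash_ne_nil rest
      cases hps : pvSplitSlash rest with
      | nil => exact absurd hps this
      | cons p ps => simp
    · have hr : '/' ∈ rest := by
        rcases List.mem_cons.mp h with h1 | h2
        · exact absurd h1.symm hc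
        · exact h2
      simp only [pvSplitSlash, if_neg hc]
      cases hps : pvSplitSlash rest with
      | nil => exact absurd hps (pvSplitSlash_ne_nil rest)
      | cons p ps =>
        have := ih hr
        rw [hps] at this
        simpa using this

lemma pv_go_eq (fuel : Nat) : ∀ (l cur : List Char) (acc : List (List Char)),
    l.length < fuel →
    PySem.Chars.splitOn.go ['/'] fuel l cur acc =
      acc.reverse ++ (match pvSplitSlash l with
        | p :: ps => (cur.reverse ++ p) :: ps
        | [] => []) := by
  induction fuel with
  | zero => intro l cur acc h; omega
  | succ f ih =>
    intro l cur acc h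
    cases l with
    | nil =>
      simp [PySem.Chars.splitOn.go, pvSplitSlash]
    | cons c rest =>
      by_cases hc : c = '/'
      · subst hc
        have hpre : List.isPrefixOf ['/'] ('/' :: rest) = true := by
          simp [List.isPrefixOf]
        rw [PySem.Chars.splitOn.go]
        simp only [hpre, if_true, List.length_singleton, List.drop_succ_cons, List.drop_zero]
        rw [ih rest [] (cur.reverse :: acc) (by simpa using Nat.lt_of_succ_lt_succ h)]
        cases hps : pvSplitSlash rest with
        | nil => exact absurd hps (pvSplitSlash_ne_nil rest)
        | cons p ps =>
          simp [pvSplitSlash, hps]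
      · have hpre : List.isPrefixOf ['/'] (c :: rest) = false := by
          simp [List.isPrefixOf]
          exact fun h' => hc h'.symm
        rw [PySem.Chars.splitOn.go]
        simp only [hpre, Bool.false_eq_true, if_false]
        rw [ih rest (c :: cur) acc (by simpa using Nat.lt_of_succ_lt_succ h)]
        cases hps : pvSplitSlash rest with
        | nil => exact absurd hps (pvSplitSlash_ne_nil rest)
        | cons p ps =>
          simp [pvSplitSlash, if_neg hc, hps]

lemma pv_splitOn_eq (cs : List Char) : PySem.Chars.splitOn cs ['/'] = pvSplitSlash cs := by
  rw [PySem.Chars.splitOn, pv_go_eq (cs.length + 1) cs [] [] (by omega)]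
  cases hps : pvSplitSlash cs with
  | nil => exact absurd hps (pvSplitSlash_ne_nil cs)
  | cons p ps => simp

-- a single character, as a substring test, is just membership
lemma pv_isIn_singleton (c : Char) (cs : List Char) :
    PySem.Chars.isIn [c] cs = cs.contains c := by
  by_cases h : c ∈ cs
  · rw [Bool.eq_iff_iff, PySem.Chars.isIn_iff_infix]
    rcases List.append_of_mem h with ⟨s, t, rfl⟩
    constructor
    · intro _; simp [h]
    · intro _; exact ⟨s, t, by simp⟩
  · rw [Bool.eq_iff_iff, PySem.Chars.isIn_iff_infix]
    constructor
    · intro hinf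
      exact absurd (hinf.mem (by simp)) h
    · intro hmem
      simp at hmem
      exact absurd hmem h

def pvInv (cs : List Char) : Bool :=
  cs.any (fun c => ['<', '>', ':', '"', '|', '?', '*'].contains c)

lemma pv_any_comm (cs : List Char) :
    ((['<', '>', ':', '"', '|', '?', '*'] : List Char).any (fun c => PySem.Chars.isIn [c] cs)) =
      cs.any (fun c => (['<', '>', ':', '"', '|', '?', '*'] : List Char).contains c) := by
  simp only [pv_isIn_singleton]
  rw [Bool.eq_iff_iff]
  simp only [List.any_eq_true, List.contains_eq_mem, decide_eq_true_eq]
  exact ⟨fun ⟨c, h1, h2⟩ => ⟨c, h2, h1⟩, fun ⟨c, h1, h2⟩ => ⟨c, h2, h1⟩⟩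

lemma pvInvalidTail_eq (cs : List Char) : pvInvalidTail cs = !pvInv cs := by
  unfold pvInvalidTail pvInv
  rw [pv_any_comm]
  cases h : cs.any (fun c => (['<', '>', ':', '"', '|', '?', '*'] : List Char).contains c) <;> simp

-- the common spec, at the loop's start state
def pvSpec (cs : List Char) : Bool :=
  (match pvSplitSlash cs with
    | [_] => true
    | [o, n] => !o.isEmpty && !n.isEmpty
    | _ => false) && !pvInv cs

-- generalized characterisation of B's loop
lemma pvGoAlt_eq (cs : List Char) : ∀ (seg_empty : Bool),
    (pvGoAlt cs 0 seg_empty =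
      ((match pvSplitSlash cs, seg_empty with
        | [_], _ => true
        | [o, n], true => !o.isEmpty && !n.isEmpty
        | [_, n], false => !n.isEmpty
        | _, _ => false) && !pvInv cs)) ∧
    (pvGoAlt cs 1 seg_empty =
      ((match pvSplitSlash cs, seg_empty with
        | [x], true => !x.isEmpty
        | [_], false => true
        | _, _ => false) && !pvInv cs)) := by
  induction cs with
  | nil =>
    intro seg_empty
    cases seg_empty <;> simp [pvGoAlt, pvSplitSlash, pvInv]
  | cons c rest ih =>
    intro seg_empty
    by_cases hc : c = '/'
    · subst hc
      have hinv : (['<', '>', ':', '"', '|', '?', '*'] : List Char).contains '/' = false := by decide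
      constructor
      · cases seg_empty
        · -- slashes = 0, seg_empty = false: recurse into state (1, true)
          simp only [pvGoAlt, beq_self_eq_true, if_true, Bool.false_or]
          rw [show (0 == 1) = false by rfl]
          simp only [Bool.false_eq_true, if_false]
          rw [(ih true).2]
          cases hps : pvSplitSlash rest with
          | nil => exact absurd hps (pvSplitSlash_ne_nil rest)
          | cons p ps =>
            cases ps <;> simp [pvSplitSlash, hps, pvInv]
        · -- seg_empty = true: immediate false; first part of split is empty
          simp only [pvGoAlt, beq_self_eq_true, if_true, Bool.true_or, if_true]
          cases hps : pvSplitSlash rest with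
          | nil => exact absurd hps (pvSplitSlash_ne_nil rest)
          | cons p ps =>
            cases ps <;> simp [pvSplitSlash, hps]
      · -- slashes = 1: a second slash, immediate false
        have : pvGoAlt ('/' :: rest) 1 seg_empty = false := by
          cases seg_empty <;> simp [pvGoAlt]
        rw [this]
        cases hps : pvSplitSlash rest with
        | nil => exact absurd hps (pvSplitSlash_ne_nil rest)
        | cons p ps =>
          cases seg_empty <;> simp [pvSplitSlash, hps]
    · by_cases hbad : c ∈ (['<', '>', ':', '"', '|', '?', '*'] : List Char)
      · have h1 : pvInv (c :: rest) = true := by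
          simp only [pvInv, List.any_cons, Bool.or_eq_true]
          left; simp [hbad]
        have hgo : ∀ sl se, pvGoAlt (c :: rest) sl se = false := by
          intro sl se
          have hne : (c == '/') = false := by simp [hc]
          simp [pvGoAlt, hne, hbad]
        constructor <;> rw [hgo] <;> simp [h1]
      · have hne : (c == '/') = false := by simp [hc]
        have hcontains : (['<', '>', ':', '"', '|', '?', '*'] : List Char).contains c = false := by
          simp [hbad]
        have hinv : pvInv (c :: rest) = pvInv rest := by
          simp only [pvInv, List.any_cons, hcontains, Bool.false_or]
        constructor
        · simp only [pvGoAlt, hne, Bool.false_eq_true, if_false, hcontains, if_false]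
          rw [(ih false).1, hinv]
          cases hps : pvSplitSlash rest with
          | nil => exact absurd hps (pvSplitSlash_ne_nil rest)
          | cons p ps =>
            cases seg_empty <;> cases ps <;>
              simp [pvSplitSlash, if_neg hc, hps] <;>
              (try rename_i ps') <;> (try cases ps') <;> simp
        · simp only [pvGoAlt, hne, Bool.false_eq_true, if_false, hcontains, if_false]
          rw [(ih false).2, hinv]
          cases hps : pvSplitSlash rest with
          | nil => exact absurd hps (pvSplitSlash_ne_nil rest)
          | cons p ps =>
            cases seg_empty <;> cases ps <;> simp [pvSplitSlash, if_neg hc, hps]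

lemma pvAlt_eq_spec (cs : List Char) : pvGoAlt cs 0 true = pvSpec cs := by
  rw [(pvGoAlt_eq cs true).1, pvSpec]
  cases hps : pvSplitSlash cs with
  | nil => exact absurd hps (pvSplitSlash_ne_nil cs)
  | cons p ps =>
    cases ps with
    | nil => rfl
    | cons q qs => cases qs <;> rfl

lemma pvA_eq_spec (s : String) : is_valid_model_name_py s = pvSpec s.toList := by
  unfold is_valid_model_name_py pvSpec
  generalize s.toList = cs
  by_cases h : '/' ∈ cs
  · have hin : PySem.Chars.isIn ['/'] cs = true := by
      rw [pv_isIn_singleton]; simp [h]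
    simp only [hin, if_true, pv_splitOn_eq]
    have hlen := pvSplitSlash_mem_slash cs h
    cases hps : pvSplitSlash cs with
    | nil => exact absurd hps (pvSplitSlash_ne_nil cs)
    | cons p ps =>
      rw [hps] at hlen
      cases ps with
      | nil => simp at hlen
      | cons q qs =>
        cases qs with
        | nil =>
          simp only [List.length_cons, List.length_nil]
          rw [if_neg (by simp)]
          by_cases hpq : p = [] ∨ q = []
          · rw [if_pos hpq]
            rcases hpq with h1 | h1 <;> simp [h1]
          · rw [if_neg hpq]
            rw [not_or] at hpq
            simp [pvInvalidTail_eq, hpq.1, hpq.2]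
        | cons r rs => simp
  · have hin : PySem.Chars.isIn ['/'] cs = false := by
      rw [pv_isIn_singleton]; simp [h]
    simp only [hin, Bool.false_eq_true, if_false]
    rw [pvSplitSlash_no_slash cs h, pvInvalidTail_eq]
    cases cs <;> simp

-- ===== VERDICT (by name: the statement is the Claim_ definition above) =====
theorem is_valid_model_name_py_spec : Claim_equal_is_valid_model_name_py := by
  intro s _
  unfold Spec_is_valid_model_name_py is_valid_model_name_py_alt
  rw [pvA_eq_spec s, ← pvAlt_eq_spec s.toList]
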